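-- pv_equiv track=rewrite | github.com/CrazyWaterdeer/Imajin | src/imajin/tools/report.py | _render_samples_markdown
-- ===== SOURCE A (Python) =====
-- from typing import Any
--
-- def _render_samples_markdown(samples: list[dict[str, Any]]) -> str:
--     if not samples:
--         return ""
--     lines = ["## Sample Groups", ""]
--     grouped: dict[str, list[dict[str, Any]]] = {}
--     for sample in samples:
--         raw = sample.get("group")
--         key = str(raw).strip() if raw not in (None, "") else "unassigned"
--         grouped.setdefault(key, []).append(sample)
--     for group, entries in sorted(grouped.items()):
--         names = ", ".join(str(e.get("sample_name", "?")) for e in entries)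
--         lines.append(f"- **{group}**: {names}")
--     lines.append("")
--     return "\n".join(lines)
-- ===== SOURCE B (Python) =====
-- def _render_samples_markdown(samples):
--     if not samples:
--         return ""
--
--     def _key(sample):
--         raw = sample.get("group")
--         return str(raw).strip() if raw not in (None, "") else "unassigned"
--
--     keys = [_key(s) for s in samples]
--     lines = ["## Sample Groups", ""]
--     for group in sorted(set(keys)):
--         names = ", ".join(
--             str(s.get("sample_name", "?")) for s, k in zip(samples, keys) if k == group
--         )
--         lines.append(f"- **{group}**: {names}")
--     lines.append("")
--     return "\n".join(lines)
-- ===== Notes on version B (the rewrite author's own statement) =====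
-- stated objective: alternative
-- what changed: B drops A's dict-of-lists grouping: it computes each sample's group key once into a parallel list, sorts the distinct keys, and renders each group's names with a single filter pass over the zipped (sample, key) list.
import Mathlib
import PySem

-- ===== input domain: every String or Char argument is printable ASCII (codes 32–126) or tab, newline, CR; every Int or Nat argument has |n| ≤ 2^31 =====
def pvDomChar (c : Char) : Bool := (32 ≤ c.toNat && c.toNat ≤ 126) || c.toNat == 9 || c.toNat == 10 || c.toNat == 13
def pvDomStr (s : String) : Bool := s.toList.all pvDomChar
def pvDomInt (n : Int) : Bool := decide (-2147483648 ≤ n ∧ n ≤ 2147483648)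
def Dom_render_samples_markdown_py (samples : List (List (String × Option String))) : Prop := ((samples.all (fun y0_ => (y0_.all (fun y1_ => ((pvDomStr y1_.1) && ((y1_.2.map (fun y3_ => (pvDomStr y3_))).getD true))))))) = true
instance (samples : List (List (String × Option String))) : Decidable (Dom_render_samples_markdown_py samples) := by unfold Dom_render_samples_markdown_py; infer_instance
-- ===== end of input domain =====

-- B replaces A's dict-of-lists grouping by computing each sample's key once, sorting the
-- distinct keys, and rendering each group with a single filter pass (objective: alternative).

-- ===== PORT A =====
-- key = str(raw).strip() if raw not in (None, "") else "unassigned"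
-- (sample.get("group") is None when the key is missing OR bound to None)
def pvKeyOf (sample : List (String × Option String)) : String :=
  match sample.lookup "group" with
  | none => "unassigned"
  | some none => "unassigned"
  | some (some s) => if s = "" then "unassigned" else PySem.Str.strip s

-- str(e.get("sample_name", "?")): missing key → "?", key bound to None → str(None) = "None"
def pvNameOf (e : List (String × Option String)) : String :=
  match e.lookup "sample_name" with
  | none => "?"
  | some none => "None"
  | some (some s) => s

def render_samples_markdown_py (samples : List (List (String × Option String))) : String :=
  if samples = [] then ""
  else
    let lines : List String := ["## Sample Groups", ""]
    -- grouped.setdefault(key, []).append(sample)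
    let grouped : PySem.Dict String (List (List (String × Option String))) :=
      samples.foldl (fun d s => d.modify (pvKeyOf s) [] (fun es => es ++ [s])) PySem.Dict.empty
    -- sorted(grouped.items()): Python compares the (key, entries) tuples; the dict's keys are
    -- distinct, so the comparison never reaches the second component — exact as sort by key.
    let lines := (PySem.List.sorted grouped.items (fun p => p.1)).foldl
      (fun ls p => ls ++ ["- **" ++ p.1 ++ "**: " ++ PySem.Str.join ", " (p.2.map pvNameOf)]) lines
    PySem.Str.join "\n" (lines ++ [""])

-- ===== PORT B =====
def render_samples_markdown_py_alt (samples : List (List (String × Option String))) : String :=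
  if samples = [] then ""
  else
    let keys := samples.map pvKeyOf
    -- sorted(set(keys)): result independent of Python's set iteration order
    let body := (PySem.List.sorted (PySem.Set.ofList keys) (fun g => g)).map
      (fun group => "- **" ++ group ++ "**: " ++
        PySem.Str.join ", " (((samples.zip keys).filter (fun p => p.2 == group)).map (fun p => pvNameOf p.1)))
    PySem.Str.join "\n" (["## Sample Groups", ""] ++ body ++ [""])

-- ===== PRECONDITION & SPEC =====
def Spec_render_samples_markdown_py (samples : List (List (String × Option String))) (out : String) : Prop := out = render_samples_markdown_py_alt samples
instance (samples : List (List (String × Option String))) (out : String) : Decidable (Spec_render_samples_markdown_py samples out) := by unfold Spec_render_samples_markdown_py; infer_instance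

-- ===== CLAIM (what is proved, stated in full; the proofs are below) =====
def Claim_equal_render_samples_markdown_py : Prop := ∀ (samples : List (List (String × Option String))), Dom_render_samples_markdown_py samples → Spec_render_samples_markdown_py samples (render_samples_markdown_py samples)

-- ===== LEMMAS AND PROOFS =====

-- the grouping loop over samples is the pair-form loop the PySem dict lemmas speak about
theorem pv_grouped_eq (samples : List (List (String × Option String))) :
    samples.foldl (fun d s => d.modify (pvKeyOf s) [] (fun es => es ++ [s]))
      (PySem.Dict.empty : PySem.Dict String (List (List (String × Option String)))) =
    (samples.map (fun s => (pvKeyOf s, s))).foldl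
      (fun d p => d.modify p.1 [] (fun es => es ++ [p.2])) PySem.Dict.empty := by
  rw [List.foldl_map]

-- fuse filter/map on the A side: entries stored under key g are exactly the filtered samples
theorem pv_filter_fst (samples : List (List (String × Option String))) (g : String) :
    ((samples.map (fun s => (pvKeyOf s, s))).filter (fun p => p.1 == g)).map (fun p => p.2) =
    samples.filter (fun s => pvKeyOf s == g) := by
  induction samples with
  | nil => rfl
  | cons s t ih =>
    simp only [List.map_cons, List.filter_cons]
    by_cases h : (pvKeyOf s == g) = true
    · simp [h, ih]
    · simp [h, ih]

-- fuse zip/filter/map on the B side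
theorem pv_filter_zip (samples : List (List (String × Option String))) (g : String) :
    ((samples.zip (samples.map pvKeyOf)).filter (fun p => p.2 == g)).map (fun p => pvNameOf p.1) =
    (samples.filter (fun s => pvKeyOf s == g)).map pvNameOf := by
  induction samples with
  | nil => rfl
  | cons s t ih =>
    simp only [List.map_cons, List.zip_cons_cons, List.filter_cons]
    by_cases h : (pvKeyOf s == g) = true
    · simp [h, ih]
    · simp [h, ih]

-- sorting the items of the grouping dict by key = mapping the sorted distinct keys
theorem pv_sorted_items (samples : List (List (String × Option String))) :
    PySem.List.sorted
      ((samples.foldl (fun d s => d.modify (pvKeyOf s) [] (fun es => es ++ [s]))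
        (PySem.Dict.empty : PySem.Dict String (List (List (String × Option String))))).items)
      (fun p => p.1) =
    (PySem.List.sorted (PySem.Set.ofList (samples.map pvKeyOf)) (fun g => g)).map
      (fun g => (g, samples.filter (fun s => pvKeyOf s == g))) := by
  rw [pv_grouped_eq]
  set ps := samples.map (fun s => (pvKeyOf s, s)) with hps
  set d := ps.foldl (fun d p => d.modify p.1 [] (fun es => es ++ [p.2]))
    (PySem.Dict.empty : PySem.Dict String (List (List (String × Option String)))) with hd
  have hkeys : d.keys = PySem.Set.ofList (samples.map pvKeyOf) := by
    rw [hd, hps, List.foldl_map,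
      PySem.Dict.keys_foldl_modify_key samples (fun s => pvKeyOf s) []
        (fun _ s => (fun es => es ++ [s])) PySem.Dict.empty]
    simp [PySem.Dict.empty, PySem.Dict.keys, PySem.Set.ofList_eq_foldl, PySem.Set.update]
  have hnodup : d.keys.Nodup := by
    rw [hd, hps, List.foldl_map]
    exact PySem.Dict.nodup_keys_foldl_modify_key samples (fun s => pvKeyOf s) []
      (fun _ s => (fun es => es ++ [s])) PySem.Dict.empty (by simp [PySem.Dict.empty, PySem.Dict.keys])
  have hgetD : ∀ g, d.getD g [] = samples.filter (fun s => pvKeyOf s == g) := by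
    intro g
    rw [hd, PySem.Dict.getD_foldl_modify_append ps PySem.Dict.empty g]
    have : (PySem.Dict.empty : PySem.Dict String (List (List (String × Option String)))).getD g [] = [] := by
      simp [PySem.Dict.empty, PySem.Dict.getD, PySem.Dict.get?]
    rw [this, hps, pv_filter_fst]
    simp
  have hitems : d.items = (PySem.Set.ofList (samples.map pvKeyOf)).map
      (fun g => (g, samples.filter (fun s => pvKeyOf s == g))) := by
    rw [PySem.Dict.items_eq_map_keys d hnodup [], hkeys]
    exact List.map_congr_left (fun g _ => by rw [hgetD g])
  apply PySem.List.sorted_eq_of_perm_of_pairwise_lt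
  · rw [hitems]
    exact (PySem.List.sorted_perm _ _ false).map _
  · rw [List.pairwise_map]
    exact PySem.List.sorted_ofList_pairwise_lt (samples.map pvKeyOf)

-- ===== VERDICT (by name: the statement is the Claim_ definition above) =====
theorem render_samples_markdown_py_spec : Claim_equal_render_samples_markdown_py := by
  intro samples _
  unfold Spec_render_samples_markdown_py render_samples_markdown_py render_samples_markdown_py_alt
  by_cases h : samples = []
  · simp [h]
  · simp only [h, if_false]
    rw [pv_sorted_items, PySem.List.foldl_append_singleton_eq_map
      (fun p : String × List (List (String × Option String)) =>
        "- **" ++ p.1 ++ "**: " ++ PySem.Str.join ", " (p.2.map pvNameOf))]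
    congr 1
    rw [List.append_assoc, List.map_map]
    refine congrArg (fun l => ["## Sample Groups", ""] ++ l) ?_
    refine congrArg (fun l => l ++ [""]) ?_
    exact List.map_congr_left (fun g _ => by rw [pv_filter_zip]; rfl)
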